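-- pv_equiv track=rewrite | github.com/christiancasey/MdC2Unicode | MdC2Unicode.py | getTextStates
-- ===== SOURCE A (Python) =====
-- vStates = '+stlib'
--
-- def getTextStates(s):
--     s = s+'+s'
--     vTextStates = []
--     iStart = 0
--     sState = 's'
--     for i, c in enumerate(s):
--         if c == '+':
--             if i and s[i-1] == '\\' or s[i-1] == '+':
--                 continue
--
--             if i < len(s)-1 and s[i+1] in vStates:
--                 sContent = s[iStart:i]
--                 if sContent:
--                     vTextStates.append((sState, sContent))
--
--                 iStart = i+2
--                 sState = s[i+1]
--
--     return vTextStates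
-- ===== SOURCE B (Python) =====
-- vStates = '+stlib'
--
-- def getTextStates(s):
--     t = s + '+s'
--     out = []
--     state = 's'
--     buf = []
--     prev = ''   # no preceding character yet
--     i, n = 0, len(t)
--     while i < n:
--         c = t[i]
--         if (c == '+' and prev != '\\' and prev != '+'
--                 and i + 1 < n and t[i+1] in vStates):
--             if buf:
--                 out.append((state, ''.join(buf)))
--             buf = []
--             state = t[i+1]
--             prev = t[i+1]
--             i += 2
--         else:
--             buf.append(c)
--             prev = c
--             i += 1
--     return out
-- ===== Notes on version B (the rewrite author's own statement) =====
-- stated objective: simpler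
-- what changed: A's enumerate loop with s[i-1] look-backs, continue-based skips and iStart/slice content extraction is replaced by a single forward pass that tracks the previous character and accumulates the current segment in a buffer, consuming two characters at each state marker.
import Mathlib
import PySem

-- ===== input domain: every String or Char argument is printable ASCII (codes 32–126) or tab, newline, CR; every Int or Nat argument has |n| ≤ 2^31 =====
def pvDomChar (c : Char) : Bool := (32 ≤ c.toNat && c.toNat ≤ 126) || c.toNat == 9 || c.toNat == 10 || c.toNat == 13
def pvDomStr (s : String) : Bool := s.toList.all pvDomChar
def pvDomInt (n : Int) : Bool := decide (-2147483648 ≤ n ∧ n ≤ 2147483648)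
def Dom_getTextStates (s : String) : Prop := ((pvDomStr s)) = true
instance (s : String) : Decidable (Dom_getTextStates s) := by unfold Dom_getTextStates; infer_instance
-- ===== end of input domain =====

-- B replaces A's index/slice scan (with its s[i-1] look-backs and continue-based skips) by a single
-- forward pass that tracks the previous character and a content buffer, consuming two characters at
-- each state marker; objective: simpler, same cost.

-- ===== PORT A =====
-- vStates = '+stlib' (module constant), as its list of characters
def vStatesA : List Char := ['+', 's', 't', 'l', 'i', 'b']

-- one iteration of A's `for i, c in enumerate(s)` body; loop state = (vTextStates, iStart, sState)
def stepA (t : List Char) :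
    (List (String × String) × Int × String) → (Int × Char) → (List (String × String) × Int × String)
  | (acc, iStart, sState), (i, c) =>
    if c = '+' then
      -- `if i and s[i-1] == '\\' or s[i-1] == '+': continue`
      if (i ≠ 0 ∧ PySem.List.pyGet? t (i - 1) = some '\\') ∨ PySem.List.pyGet? t (i - 1) = some '+' then
        (acc, iStart, sState)
      -- `if i < len(s)-1 and s[i+1] in vStates:`  (s[i+1] is in range under the guard)
      else if i < (t.length : Int) - 1 ∧ PySem.List.pyGetD t (i + 1) ' ' ∈ vStatesA then
        let sContent := PySem.List.slice t (some iStart) (some i)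
        let acc' := if sContent ≠ [] then acc ++ [(sState, String.ofList sContent)] else acc
        (acc', i + 2, String.ofList [PySem.List.pyGetD t (i + 1) ' '])
      else (acc, iStart, sState)
    else (acc, iStart, sState)

def getTextStates (s : String) : List (String × String) :=
  let t := s.toList ++ ['+', 's']      -- s = s + '+s'
  ((PySem.List.enumerate t 0).foldl (stepA t) ([], 0, "s")).1

-- ===== PORT B =====
-- B's while loop, one call per iteration; state = (remaining input, prev char, state, buffer, output)
def goAlt : List Char → Option Char → String → List Char → List (String × String) → List (String × String)
  | [], _, _, _, out => out
  | [c], _, state, buf, out => goAlt [] (some c) state (buf ++ [c]) out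
  | c :: x :: rest', prev, state, buf, out =>
    if c = '+' ∧ prev ≠ some '\\' ∧ prev ≠ some '+' ∧ x ∈ vStatesA then
      goAlt rest' (some x) (String.ofList [x]) []
        (if buf ≠ [] then out ++ [(state, String.ofList buf)] else out)
    else
      goAlt (x :: rest') (some c) state (buf ++ [c]) out
termination_by l _ _ _ _ => l.length
decreasing_by all_goals simp

def getTextStates_alt (s : String) : List (String × String) :=
  goAlt (s.toList ++ ['+', 's']) none "s" [] []

-- ===== PRECONDITION & SPEC =====
def Spec_getTextStates (s : String) (out : List (String × String)) : Prop := out = getTextStates_alt s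
instance (s : String) (out : List (String × String)) : Decidable (Spec_getTextStates s out) := by unfold Spec_getTextStates; infer_instance

-- ===== CLAIM (what is proved, stated in full; the proofs are below) =====
def Claim_equal_getTextStates : Prop := ∀ (s : String), Dom_getTextStates s → Spec_getTextStates s (getTextStates s)

-- ===== LEMMAS AND PROOFS =====

-- extending A's content slice by the character at position b
lemma take_drop_snoc (t : List Char) (a b : Nat) (c : Char)
    (hab : a ≤ b) (hb : t[b]? = some c) :
    (t.drop a).take (b + 1 - a) = (t.drop a).take (b - a) ++ [c] := by
  have hba : (t.drop a)[b - a]? = some c := by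
    rw [List.getElem?_drop]
    have h : a + (b - a) = b := by omega
    rw [h]; exact hb
  have h1 : b + 1 - a = (b - a) + 1 := by omega
  rw [h1, List.take_add_one, hba]
  rfl

-- A's skip test `i and s[i-1]=='\\' or s[i-1]=='+'` is false when the previous character
-- (none at i = 0; the char at i-1 otherwise) is neither '\' nor '+' and the last char is not '+'
lemma skip_false (t : List Char) (hlast : t.getLast? ≠ some '+') (i : Nat) (prev : Option Char)
    (h0 : i = 0 → prev = none) (hj : ∀ j : Nat, i = j + 1 → prev = t[j]?)
    (hpb : prev ≠ some '\\') (hpp : prev ≠ some '+') :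
    ¬ (((i : Int) ≠ 0 ∧ PySem.List.pyGet? t ((i : Int) - 1) = some '\\') ∨
        PySem.List.pyGet? t ((i : Int) - 1) = some '+') := by
  rcases Nat.eq_zero_or_pos i with hi0 | hipos
  · subst hi0
    simp only [Nat.cast_zero, zero_sub, PySem.List.pyGet?_neg_one]
    simp [hlast]
  · obtain ⟨j, rfl⟩ : ∃ j, i = j + 1 := ⟨i - 1, by omega⟩
    have hpj := hj j rfl
    have harg : ((j + 1 : Nat) : Int) - 1 = ((j : Nat) : Int) := by push_cast; ring
    rw [harg, PySem.List.pyGet?_natCast, ← hpj]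
    push Not
    exact ⟨fun _ => hpb, hpp⟩

-- and it is true when the previous character is '\' or '+'
lemma skip_true (t : List Char) (j : Nat) (prev : Option Char)
    (hpj : prev = t[j]?) (hpbad : prev = some '\\' ∨ prev = some '+') :
    ((((j + 1 : Nat) : Int) ≠ 0 ∧ PySem.List.pyGet? t (((j + 1 : Nat) : Int) - 1) = some '\\') ∨
        PySem.List.pyGet? t (((j + 1 : Nat) : Int) - 1) = some '+') := by
  have harg : ((j + 1 : Nat) : Int) - 1 = ((j : Nat) : Int) := by push_cast; ring
  rw [harg, PySem.List.pyGet?_natCast, ← hpj]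
  rcases hpbad with h | h
  · exact Or.inl ⟨by push_cast; omega, h⟩
  · exact Or.inr h

-- the core invariant: A's fold over the enumerated suffix equals B's recursion on the suffix
lemma loop_eq (t : List Char) (hlast : t.getLast? ≠ some '+') :
    ∀ n (l₂ : List Char), l₂.length ≤ n →
    ∀ (i iStart : Nat) (prev : Option Char) (state : String) (acc : List (String × String)),
      t.drop i = l₂ → iStart ≤ i →
      (i = 0 → prev = none) → (∀ j : Nat, i = j + 1 → prev = t[j]?) →
      ((PySem.List.enumerate l₂ (i : Int)).foldl (stepA t) (acc, (iStart : Int), state)).1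
        = goAlt l₂ prev state ((t.drop iStart).take (i - iStart)) acc := by
  intro n
  induction n with
  | zero =>
    intro l₂ hlen i iStart prev state acc hdrop hle h0 hj
    have hnil : l₂ = [] := List.length_eq_zero_iff.mp (Nat.le_zero.mp hlen)
    subst hnil
    simp [PySem.List.enumerate_nil, goAlt]
  | succ n ih =>
    intro l₂ hlen i iStart prev state acc hdrop hle h0 hj
    match l₂, hlen, hdrop with
    | [], hlen, hdrop => simp [PySem.List.enumerate_nil, goAlt]
    | c :: rest, hlen, hdrop =>
    have hti : t[i]? = some c := by
      have h := congrArg (fun l => l[0]?) hdrop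
      simpa [List.getElem?_drop] using h
    have hi_lt : i < t.length := (List.getElem?_eq_some_iff.mp hti).1
    have hdrop1 : t.drop (i + 1) = rest := by
      have h := congrArg List.tail hdrop
      simpa [List.tail_drop] using h
    rw [PySem.List.enumerate_cons, List.foldl_cons]
    match rest, hlen, hdrop1 with
    | [], hlen, hdrop1 =>
      have hlen_t : t.length = i + 1 := by
        have h := congrArg List.length hdrop1
        simp [List.length_drop] at h
        omega
      rw [PySem.List.enumerate_nil, List.foldl_nil]
      have hrhs : goAlt [c] prev state ((t.drop iStart).take (i - iStart)) acc = acc := by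
        simp [goAlt]
      rw [hrhs]
      simp only [stepA]
      split_ifs with h1 h2 h3 h4
      all_goals try rfl
      all_goals exfalso; have h3' := h3.1; rw [hlen_t] at h3'; push_cast at h3'; omega
    | x :: rest', hlen, hdrop1 =>
      have htx : t[i + 1]? = some x := by
        have h := congrArg (fun l => l[0]?) hdrop1
        simpa [List.getElem?_drop] using h
      have hi1_lt : i + 1 < t.length := (List.getElem?_eq_some_iff.mp htx).1
      have hdrop2 : t.drop (i + 2) = rest' := by
        have h := congrArg List.tail hdrop1
        simpa [List.tail_drop] using h
      have hgd : PySem.List.pyGetD t ((i : Int) + 1) ' ' = x := by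
        have harg : ((i : Int) + 1) = ((i + 1 : Nat) : Int) := by push_cast; ring
        rw [harg, PySem.List.pyGetD_natCast, List.getD_eq_getElem?_getD, htx]
        rfl
      have hsl : PySem.List.slice t (some (iStart : Int)) (some (i : Int)) =
          (t.drop iStart).take (i - iStart) := PySem.List.slice_natCast t iStart i
      by_cases hsw : c = '+' ∧ prev ≠ some '\\' ∧ prev ≠ some '+' ∧ x ∈ vStatesA
      · obtain ⟨hc, hpb, hpp, hx⟩ := hsw
        subst hc
        have hskip := skip_false t hlast i prev h0 hj hpb hpp
        have hguard : ((i : Int) < (t.length : Int) - 1 ∧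
            PySem.List.pyGetD t ((i : Int) + 1) ' ' ∈ vStatesA) := by
          refine ⟨by omega, ?_⟩
          rw [hgd]; exact hx
        have hstep1 : stepA t (acc, (iStart : Int), state) ((i : Int), '+') =
            (if (t.drop iStart).take (i - iStart) ≠ [] then
                acc ++ [(state, String.ofList ((t.drop iStart).take (i - iStart)))] else acc,
             (i : Int) + 2, String.ofList [x]) := by
          simp only [stepA]
          rw [if_pos trivial, if_neg hskip, if_pos hguard, hsl, hgd]
        rw [hstep1, PySem.List.enumerate_cons, List.foldl_cons]
        have hstep2 : ∀ st : List (String × String) × Int × String,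
            stepA t st ((i : Int) + 1, x) = st := by
          intro ⟨a0, a1, a2⟩
          by_cases hx' : x = '+'
          · subst hx'
            have hcond : (((i : Int) + 1 ≠ 0 ∧
                PySem.List.pyGet? t ((i : Int) + 1 - 1) = some '\\') ∨
                PySem.List.pyGet? t ((i : Int) + 1 - 1) = some '+') := by
              rw [show (i : Int) + 1 - 1 = ((i : Nat) : Int) by ring, PySem.List.pyGet?_natCast]
              exact Or.inr hti
            simp only [stepA]
            rw [if_pos trivial, if_pos hcond]
          · simp only [stepA]
            rw [if_neg hx']
        rw [hstep2]
        have hlen' : rest'.length ≤ n := by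
          simp only [List.length_cons] at hlen; omega
        have hres := ih rest' hlen' (i + 2) (i + 2) (some x) (String.ofList [x])
          (if (t.drop iStart).take (i - iStart) ≠ [] then
              acc ++ [(state, String.ofList ((t.drop iStart).take (i - iStart)))] else acc)
          hdrop2 le_rfl (fun h => absurd h (by omega))
          (fun j hj2 => by
            have hji : j = i + 1 := by omega
            subst hji; exact htx.symm)
        have e1 : (i : Int) + 1 + 1 = ((i + 2 : Nat) : Int) := by push_cast; ring
        have e2 : (i : Int) + 2 = ((i + 2 : Nat) : Int) := by push_cast; ring
        rw [e1, e2, hres]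
        have hrhs : goAlt ('+' :: x :: rest') prev state ((t.drop iStart).take (i - iStart)) acc =
            goAlt rest' (some x) (String.ofList [x]) []
              (if (t.drop iStart).take (i - iStart) ≠ [] then
                  acc ++ [(state, String.ofList ((t.drop iStart).take (i - iStart)))] else acc) := by
          simp [goAlt, hpb, hpp, hx]
        rw [hrhs]
        simp
      · have hstep1 : stepA t (acc, (iStart : Int), state) ((i : Int), c) =
            (acc, (iStart : Int), state) := by
          by_cases hc : c = '+'
          · subst hc
            by_cases hpbad : prev = some '\\' ∨ prev = some '+'
            · obtain ⟨j, rfl⟩ : ∃ j, i = j + 1 := by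
                rcases Nat.eq_zero_or_pos i with h | h
                · exfalso
                  have hn := h0 h
                  rcases hpbad with h' | h' <;> simp [hn] at h'
                · exact ⟨i - 1, by omega⟩
              have hpj := hj j rfl
              simp only [stepA]
              rw [if_pos trivial, if_pos (skip_true t j prev hpj hpbad)]
            · have hpb : prev ≠ some '\\' := fun h => hpbad (Or.inl h)
              have hpp : prev ≠ some '+' := fun h => hpbad (Or.inr h)
              have hx : x ∉ vStatesA := fun h => hsw ⟨rfl, hpb, hpp, h⟩
              have hskip := skip_false t hlast i prev h0 hj hpb hpp
              simp only [stepA]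
              rw [if_pos trivial, if_neg hskip, if_neg (fun h => hx (hgd ▸ h.2))]
          · simp only [stepA]
            rw [if_neg hc]
        rw [hstep1]
        have hlen' : (x :: rest').length ≤ n := by
          simp only [List.length_cons] at hlen ⊢; omega
        have hres := ih (x :: rest') hlen' (i + 1) iStart (some c) state acc hdrop1
          (by omega) (fun h => absurd h (by omega))
          (fun j hj2 => by
            have hji : j = i := by omega
            subst hji; exact hti.symm)
        have e1 : (i : Int) + 1 = ((i + 1 : Nat) : Int) := by push_cast; ring
        rw [e1, hres]
        have hbuf : (t.drop iStart).take (i + 1 - iStart) =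
            (t.drop iStart).take (i - iStart) ++ [c] := by
          have h := take_drop_snoc t iStart i c hle hti
          rwa [show i + 1 - iStart = i - iStart + 1 by omega] at h ⊢
        rw [hbuf]
        have hrhs : goAlt (c :: x :: rest') prev state ((t.drop iStart).take (i - iStart)) acc =
            goAlt (x :: rest') (some c) state ((t.drop iStart).take (i - iStart) ++ [c]) acc := by
          simp only [goAlt]
          rw [if_neg hsw]
        rw [hrhs]

-- ===== VERDICT (by name: the statement is the Claim_ definition above) =====
theorem getTextStates_spec : Claim_equal_getTextStates := by
  intro s _
  unfold Spec_getTextStates getTextStates getTextStates_alt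
  have hlast : (s.toList ++ ['+', 's']).getLast? ≠ some '+' := by
    simp [List.getLast?_append]
  have h := loop_eq (s.toList ++ ['+', 's']) hlast (s.toList ++ ['+', 's']).length
    (s.toList ++ ['+', 's']) le_rfl 0 0 none "s" []
    (by simp) le_rfl (fun _ => rfl) (fun j h => absurd h (by omega))
  simpa using h
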